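-- pv_equiv track=rewrite | github.com/jmolenaa/AOC2024 | day2/sol.py | check_reverse
-- ===== SOURCE A (Python) =====
-- def check_validity(numbers):
-- 	if numbers == sorted(numbers) or numbers == sorted(numbers, reverse=True):
-- 		for number1, number2 in zip(numbers, numbers[1:]):
-- 			diff = abs(number1 - number2)
-- 			if diff == 0 or diff > 3:
-- 				return False
-- 		return True
-- 	return False
--
-- def check_reverse(numbers):
-- 	i = 0
-- 	for number1, number2 in zip(numbers, numbers[1:]):
-- 		diff = abs(number1 - number2)
-- 		if number1 <= number2 or diff > 3:
-- 			newNumbers = list(numbers)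
-- 			newNumbers.pop(i)
-- 			if check_validity(newNumbers) == True:
-- 				return True
-- 			newNumbers = list(numbers)
-- 			newNumbers.pop(i + 1)
-- 			if check_validity(newNumbers) == True:
-- 				return True
-- 		i += 1
-- 	return False
-- ===== SOURCE B (Python) =====
-- def check_reverse(numbers):
--     n = len(numbers)
--
--     def valid_skipping(skip):
--         # scan numbers, ignoring index `skip`: every adjacent step must have the
--         # same sign and magnitude 1..3
--         prev = None
--         direction = 0
--         for j in range(n):
--             if j == skip:
--                 continue
--             x = numbers[j]
--             if prev is not None:
--                 d = x - prev
--                 if d == 0 or d > 3 or d < -3: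
--                     return False
--                 s = 1 if d > 0 else -1
--                 if direction == 0:
--                     direction = s
--                 elif s != direction:
--                     return False
--             prev = x
--         return True
--
--     for i in range(n - 1):
--         a, b = numbers[i], numbers[i + 1]
--         if a <= b or a - b > 3:
--             if valid_skipping(i) or valid_skipping(i + 1):
--                 return True
--     return False
-- ===== Notes on version B (the rewrite author's own statement) =====
-- stated objective: faster
-- what changed: B replaces A's per-candidate list copy + double sort + rescan (check_validity) by a single direction-tracking index scan that skips the removed position, so no copies and no sorting are performed.
import Mathlib
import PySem

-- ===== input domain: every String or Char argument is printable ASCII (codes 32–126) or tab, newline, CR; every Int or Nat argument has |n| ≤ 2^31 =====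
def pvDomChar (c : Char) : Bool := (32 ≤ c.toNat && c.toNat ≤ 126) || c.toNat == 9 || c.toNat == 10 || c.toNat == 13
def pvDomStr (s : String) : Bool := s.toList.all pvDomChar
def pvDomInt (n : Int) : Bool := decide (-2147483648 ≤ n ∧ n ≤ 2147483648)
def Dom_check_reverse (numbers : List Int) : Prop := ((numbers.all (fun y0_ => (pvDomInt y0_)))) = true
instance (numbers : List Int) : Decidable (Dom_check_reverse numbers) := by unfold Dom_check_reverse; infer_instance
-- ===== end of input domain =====

-- B replaces A's per-candidate copy + sort + rescan by a single direction-tracking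
-- scan over indices that skips the removed position (objective: faster, no sorting/copying).

-- ===== PORT A =====
-- for number1, number2 in zip(numbers, numbers[1:]): if diff == 0 or diff > 3: return False / return True
def chkPairsA : List (Int × Int) → Bool
  | [] => true
  | (a, b) :: rest =>
    let diff := |a - b|
    if diff = 0 ∨ diff > 3 then false else chkPairsA rest

def check_validity (numbers : List Int) : Bool :=
  if numbers = PySem.List.sorted numbers (fun x => x) false ∨
     numbers = PySem.List.sorted numbers (fun x => x) true then
    chkPairsA (List.zip numbers numbers.tail)
  else false

-- the main loop of A, with the running counter i; pop(i)/pop(i+1) via PySem.List.pop?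
-- (always in range here, the `none` branch is unreachable)
def loopA (numbers : List Int) : List (Int × Int) → Int → Bool
  | [], _ => false
  | (a, b) :: rest, i =>
    let diff := |a - b|
    if a ≤ b ∨ diff > 3 then
      match PySem.List.pop? numbers i, PySem.List.pop? numbers (i + 1) with
      | some (_, new1), some (_, new2) =>
        if check_validity new1 = true then true
        else if check_validity new2 = true then true
        else loopA numbers rest (i + 1)
      | _, _ => false
    else loopA numbers rest (i + 1)

def check_reverse (numbers : List Int) : Bool :=
  loopA numbers (List.zip numbers numbers.tail) 0

-- ===== PORT B =====
-- the `for j in range(n)` scan of valid_skipping, state (prev, direction), early returns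
def validSkipGo (numbers : List Int) (skip : Int) : List Int → Option Int → Int → Bool
  | [], _, _ => true
  | j :: js, prev, dir =>
    if j = skip then validSkipGo numbers skip js prev dir
    else
      let x := PySem.List.pyGetD numbers j 0
      match prev with
      | none => validSkipGo numbers skip js (some x) dir
      | some p =>
        let d := x - p
        if d = 0 ∨ d > 3 ∨ d < -3 then false
        else
          let s : Int := if d > 0 then 1 else -1
          if dir = 0 then validSkipGo numbers skip js (some x) s
          else if s ≠ dir then false
          else validSkipGo numbers skip js (some x) dir

def valid_skipping (numbers : List Int) (skip : Int) : Bool :=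
  validSkipGo numbers skip (PySem.List.pyRange 0 (numbers.length : Int) 1) none 0

-- for i in range(n - 1)
def loopB (numbers : List Int) : List Int → Bool
  | [] => false
  | i :: is =>
    let a := PySem.List.pyGetD numbers i 0
    let b := PySem.List.pyGetD numbers (i + 1) 0
    if a ≤ b ∨ a - b > 3 then
      if valid_skipping numbers i || valid_skipping numbers (i + 1) then true
      else loopB numbers is
    else loopB numbers is

def check_reverse_alt (numbers : List Int) : Bool :=
  loopB numbers (PySem.List.pyRange 0 ((numbers.length : Int) - 1) 1)

-- ===== PRECONDITION & SPEC =====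
def Spec_check_reverse (numbers : List Int) (out : Bool) : Prop := out = check_reverse_alt numbers
instance (numbers : List Int) (out : Bool) : Decidable (Spec_check_reverse numbers out) := by unfold Spec_check_reverse; infer_instance

-- ===== CLAIM (what is proved, stated in full; the proofs are below) =====
def Claim_equal_check_reverse : Prop := ∀ (numbers : List Int), Dom_check_reverse numbers → Spec_check_reverse numbers (check_reverse numbers)

-- ===== LEMMAS AND PROOFS =====

-- proof-side: the same scan as validSkipGo, but over an explicit list of values
def validScan : List Int → Option Int → Int → Bool
  | [], _, _ => true
  | x :: xs, prev, dir =>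
    match prev with
    | none => validScan xs (some x) dir
    | some p =>
      let d := x - p
      if d = 0 ∨ d > 3 ∨ d < -3 then false
      else
        let s : Int := if d > 0 then 1 else -1
        if dir = 0 then validScan xs (some x) s
        else if s ≠ dir then false
        else validScan xs (some x) dir

-- the two adjacent-pair relations both programs recognise
def incRel (a b : Int) : Prop := a < b ∧ b ≤ a + 3
def decRel (a b : Int) : Prop := b < a ∧ a ≤ b + 3

lemma isChain_and {α : Type} (R S : α → α → Prop) :
    (l : List α) → (List.IsChain (fun a b => R a b ∧ S a b) l ↔ List.IsChain R l ∧ List.IsChain S l)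
  | [] => by simp
  | [_] => by simp
  | x :: y :: t => by
      simp only [List.isChain_cons_cons, isChain_and R S (y :: t)]
      tauto

lemma isChain_imp {α : Type} {R S : α → α → Prop} (h : ∀ a b, R a b → S a b) :
    (l : List α) → List.IsChain R l → List.IsChain S l
  | [] => by simp
  | [_] => by simp
  | x :: y :: t => by
      simp only [List.isChain_cons_cons]
      rintro ⟨h1, h2⟩
      exact ⟨h x y h1, isChain_imp h (y :: t) h2⟩

lemma validSkipGo_eq_validScan (numbers : List Int) (skip : Int) (js : List Int)
    (prev : Option Int) (dir : Int) :
    validSkipGo numbers skip js prev dir =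
      validScan ((js.filter (fun j => j ≠ skip)).map (fun j => PySem.List.pyGetD numbers j 0)) prev dir := by
  induction js generalizing prev dir with
  | nil => rfl
  | cons j js ih =>
    by_cases hj : j = skip
    · simp [validSkipGo, hj, ih]
    · cases prev with
      | none => simp [validSkipGo, validScan, hj, ih]
      | some p => simp [validSkipGo, validScan, hj, ih]

lemma validScan_some_pos (p : Int) (xs : List Int) :
    (validScan xs (some p) 1 = true) ↔ List.IsChain incRel (p :: xs) := by
  induction xs generalizing p with
  | nil => simp [validScan]
  | cons x xs ih =>
    simp only [validScan, List.isChain_cons_cons]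
    by_cases h1 : x - p = 0 ∨ x - p > 3 ∨ x - p < -3
    · simp only [if_pos h1]
      constructor
      · intro h; cases h
      · rintro ⟨⟨h2, h3⟩, -⟩; omega
    · simp only [if_neg h1]
      by_cases h2 : x - p > 0
      · rw [if_pos h2, if_neg (by omega : ¬ ((1:Int) = 0)),
          if_neg (by simp : ¬ ((1:Int) ≠ 1)), ih]
        unfold incRel
        constructor
        · intro h; exact ⟨⟨by omega, by omega⟩, h⟩
        · rintro ⟨-, h⟩; exact h
      · rw [if_neg h2, if_neg (by omega : ¬ ((1:Int) = 0)),
          if_pos (by omega : ((-1:Int) ≠ 1))]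
        constructor
        · intro h; cases h
        · rintro ⟨⟨h3, h4⟩, -⟩; omega

lemma validScan_some_neg (p : Int) (xs : List Int) :
    (validScan xs (some p) (-1) = true) ↔ List.IsChain decRel (p :: xs) := by
  induction xs generalizing p with
  | nil => simp [validScan]
  | cons x xs ih =>
    simp only [validScan, List.isChain_cons_cons]
    by_cases h1 : x - p = 0 ∨ x - p > 3 ∨ x - p < -3
    · simp only [if_pos h1]
      constructor
      · intro h; cases h
      · rintro ⟨⟨h2, h3⟩, -⟩; omega
    · simp only [if_neg h1]
      by_cases h2 : x - p > 0
      · rw [if_pos h2, if_neg (by omega : ¬ ((-1:Int) = 0)),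
          if_pos (by omega : ((1:Int) ≠ -1))]
        constructor
        · intro h; cases h
        · rintro ⟨⟨h3, h4⟩, -⟩; omega
      · rw [if_neg h2, if_neg (by omega : ¬ ((-1:Int) = 0)),
          if_neg (by simp : ¬ ((-1:Int) ≠ -1)), ih]
        unfold decRel
        constructor
        · intro h; exact ⟨⟨by omega, by omega⟩, h⟩
        · rintro ⟨-, h⟩; exact h

lemma validScan_some_zero (p : Int) (xs : List Int) :
    (validScan xs (some p) 0 = true) ↔
      (List.IsChain incRel (p :: xs) ∨ List.IsChain decRel (p :: xs)) := by
  cases xs with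
  | nil => simp [validScan]
  | cons x xs =>
    simp only [validScan, List.isChain_cons_cons]
    by_cases h1 : x - p = 0 ∨ x - p > 3 ∨ x - p < -3
    · simp only [if_pos h1]
      constructor
      · intro h; cases h
      · rintro (⟨⟨h2, h3⟩, -⟩ | ⟨⟨h2, h3⟩, -⟩) <;> omega
    · simp only [if_neg h1]
      by_cases h2 : x - p > 0
      · rw [if_pos h2]
        rw [if_pos (by trivial)]
        rw [validScan_some_pos]
        constructor
        · intro h; exact Or.inl ⟨⟨by omega, by omega⟩, h⟩
        · rintro (⟨-, h⟩ | ⟨⟨h3, h4⟩, -⟩)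
          · exact h
          · omega
      · rw [if_neg h2]
        rw [if_pos (by trivial)]
        rw [validScan_some_neg]
        constructor
        · intro h; exact Or.inr ⟨⟨by omega, by omega⟩, h⟩
        · rintro (⟨⟨h3, h4⟩, -⟩ | ⟨-, h⟩)
          · omega
          · exact h

lemma validScan_none (xs : List Int) :
    (validScan xs none 0 = true) ↔ (List.IsChain incRel xs ∨ List.IsChain decRel xs) := by
  cases xs with
  | nil => simp [validScan]
  | cons x xs => simpa [validScan] using validScan_some_zero x xs

lemma chkPairsA_iff :
    (xs : List Int) → ((chkPairsA (List.zip xs xs.tail) = true) ↔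
      List.IsChain (fun a b => ¬ (|a - b| = 0 ∨ |a - b| > 3)) xs)
  | [] => by simp [chkPairsA]
  | [_] => by simp [chkPairsA]
  | x :: y :: t => by
      have ih := chkPairsA_iff (y :: t)
      simp only [List.zip, List.tail_cons, List.zipWith_cons_cons, chkPairsA,
        List.isChain_cons_cons] at ih ⊢
      by_cases h : |x - y| = 0 ∨ |x - y| > 3
      · rw [if_pos h]
        constructor
        · intro hf; exact absurd hf (by simp)
        · rintro ⟨hab, -⟩; exact absurd h hab
      · rw [if_neg h, ih]
        constructor
        · intro hc; exact ⟨h, hc⟩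
        · rintro ⟨-, hc⟩; exact hc

lemma sorted_self_iff (xs : List Int) :
    xs = PySem.List.sorted xs (fun x => x) false ↔ List.IsChain (fun a b : Int => a ≤ b) xs := by
  constructor
  · intro h
    have hp : List.Pairwise (fun a b : Int => a ≤ b) xs := by
      have := PySem.List.sorted_pairwise xs (fun x => x)
      rw [← h] at this
      exact this
    exact List.isChain_iff_pairwise.mpr hp
  · intro h
    have hp : List.Pairwise (fun a b : Int => a ≤ b) xs := List.isChain_iff_pairwise.mp h
    exact (PySem.List.sorted_eq_self_of_pairwise xs (fun x => x) hp).symm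

lemma sorted_rev_self_iff (xs : List Int) :
    xs = PySem.List.sorted xs (fun x => x) true ↔ List.IsChain (fun a b : Int => b ≤ a) xs := by
  constructor
  · intro h
    have hp : List.Pairwise (fun a b : Int => b ≤ a) xs := by
      have := PySem.List.sorted_pairwise_rev xs (fun x => x)
      rw [← h] at this
      exact this
    exact List.isChain_iff_pairwise.mpr hp
  · intro h
    have hp : List.Pairwise (fun a b : Int => b ≤ a) xs := List.isChain_iff_pairwise.mp h
    exact (PySem.List.sorted_rev_eq_self_of_pairwise xs (fun x => x) hp).symm

lemma check_validity_iff (xs : List Int) :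
    (check_validity xs = true) ↔ (List.IsChain incRel xs ∨ List.IsChain decRel xs) := by
  unfold check_validity
  by_cases h : xs = PySem.List.sorted xs (fun x => x) false ∨
      xs = PySem.List.sorted xs (fun x => x) true
  · rw [if_pos h, chkPairsA_iff]
    rw [sorted_self_iff, sorted_rev_self_iff] at h
    constructor
    · intro hc
      rcases h with h | h
      · refine Or.inl (isChain_imp (fun a b hab => ?_) xs ((isChain_and _ _ xs).mpr ⟨h, hc⟩))
        obtain ⟨hle, hne⟩ := hab
        unfold incRel
        rcases abs_cases (a - b) with ⟨he, hs⟩ | ⟨he, hs⟩ <;> rw [he] at hne <;> omega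
      · refine Or.inr (isChain_imp (fun a b hab => ?_) xs ((isChain_and _ _ xs).mpr ⟨h, hc⟩))
        obtain ⟨hle, hne⟩ := hab
        unfold decRel
        rcases abs_cases (a - b) with ⟨he, hs⟩ | ⟨he, hs⟩ <;> rw [he] at hne <;> omega
    · rintro (hc | hc)
      · refine isChain_imp (fun a b hab => ?_) xs hc
        unfold incRel at hab
        rcases abs_cases (a - b) with ⟨he, hs⟩ | ⟨he, hs⟩ <;> rw [he] <;> omega
      · refine isChain_imp (fun a b hab => ?_) xs hc
        unfold decRel at hab
        rcases abs_cases (a - b) with ⟨he, hs⟩ | ⟨he, hs⟩ <;> rw [he] <;> omega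
  · rw [if_neg h]
    rw [sorted_self_iff, sorted_rev_self_iff] at h
    push_neg at h
    constructor
    · intro hc; cases hc
    · rintro (hc | hc)
      · exact absurd (isChain_imp (fun a b hab => hab.1.le) xs hc) h.1
      · exact absurd (isChain_imp (fun a b hab => hab.1.le) xs hc) h.2

lemma filter_pyRange_ne (n : Int) (k : Nat) (hk : (k : Int) < n) :
    (PySem.List.pyRange 0 n 1).filter (fun j => j ≠ (k : Int)) =
      PySem.List.pyRange 0 (k : Int) 1 ++ PySem.List.pyRange ((k : Int) + 1) n 1 := by
  rw [PySem.List.pyRange_one_append 0 (k : Int) n (by omega) (by omega),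
    PySem.List.pyRange_one_cons hk, List.filter_append, List.filter_cons]
  have h1 : (PySem.List.pyRange 0 (k : Int) 1).filter (fun j => j ≠ (k : Int)) =
      PySem.List.pyRange 0 (k : Int) 1 := by
    apply List.filter_eq_self.mpr
    intro a ha
    rw [PySem.List.mem_pyRange_one] at ha
    simp only [ne_eq, decide_eq_true_eq]
    omega
  have h2 : (PySem.List.pyRange ((k : Int) + 1) n 1).filter (fun j => j ≠ (k : Int)) =
      PySem.List.pyRange ((k : Int) + 1) n 1 := by
    apply List.filter_eq_self.mpr
    intro a ha
    rw [PySem.List.mem_pyRange_one] at ha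
    simp only [ne_eq, decide_eq_true_eq]
    omega
  simp only [ne_eq, decide_not] at h1 h2 ⊢
  simp [h1, h2]

lemma map_get_pyRange_take (numbers : List Int) (k : Nat) (hk : k ≤ numbers.length) :
    (PySem.List.pyRange 0 (k : Int) 1).map (fun j => PySem.List.pyGetD numbers j 0) =
      numbers.take k := by
  have hlen : (numbers.take k).length = k := by simp [hk]
  have h1 : (PySem.List.pyRange 0 (k : Int) 1).map
      (fun j => PySem.List.pyGetD (numbers.take k) j 0) = numbers.take k := by
    have := PySem.List.map_pyGetD_pyRange (numbers.take k) 0 (le_refl (0 : Int))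
    simpa [PySem.List.len, hlen] using this
  rw [← h1]
  apply List.map_congr_left
  intro j hj
  rw [PySem.List.mem_pyRange_one] at hj
  have hj1 : j < ((numbers.take k).length : Int) := by omega
  have hj2 : j < (numbers.length : Int) := by omega
  rw [PySem.List.pyGetD_eq_getElem _ _ hj.1 hj2, PySem.List.pyGetD_eq_getElem _ _ hj.1 hj1,
    List.getElem_take]

lemma map_get_pyRange_drop (numbers : List Int) (k : Nat) :
    (PySem.List.pyRange ((k : Int)) ((numbers.length : Int)) 1).map
      (fun j => PySem.List.pyGetD numbers j 0) = numbers.drop k := by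
  have := PySem.List.map_pyGetD_pyRange numbers 0 (by omega : (0:Int) ≤ (k : Int))
  simpa [PySem.List.len] using this

lemma valid_skipping_eq (numbers : List Int) (k : Nat) (hk : k < numbers.length) :
    valid_skipping numbers (k : Int) = check_validity (numbers.eraseIdx k) := by
  rw [Bool.eq_iff_iff]
  unfold valid_skipping
  rw [validSkipGo_eq_validScan, filter_pyRange_ne _ k (by omega), List.map_append,
    map_get_pyRange_take numbers k (by omega)]
  have hd : (PySem.List.pyRange ((k : Int) + 1) ((numbers.length : Int)) 1).map
      (fun j => PySem.List.pyGetD numbers j 0) = numbers.drop (k + 1) := by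
    have h2 := map_get_pyRange_drop numbers (k + 1)
    rw [Nat.cast_add, Nat.cast_one] at h2
    exact h2
  rw [hd, ← List.eraseIdx_eq_take_drop_succ, validScan_none, check_validity_iff]

lemma loop_eq_aux (numbers : List Int) :
    ∀ (m k : Nat), numbers.length ≤ k + m + 1 →
    loopA numbers (List.zip (numbers.drop k) (numbers.drop (k + 1))) (k : Int) =
      loopB numbers (PySem.List.pyRange (k : Int) ((numbers.length : Int) - 1) 1) := by
  intro m
  induction m with
  | zero =>
    intro k hk
    have h1 : numbers.drop (k + 1) = [] := List.drop_eq_nil_iff.mpr (by omega)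
    rw [h1, List.zip_nil_right, PySem.List.pyRange_one_eq_nil (by omega)]
    rfl
  | succ m ih =>
    intro k hk
    by_cases hlt : k + 1 < numbers.length
    · have hk1 : k < numbers.length := by omega
      have e1 : numbers.drop k = numbers[k] :: numbers.drop (k + 1) :=
        List.drop_eq_getElem_cons hk1
      have e2 : numbers.drop (k + 1) = numbers[k + 1] :: numbers.drop (k + 2) := by
        have := List.drop_eq_getElem_cons hlt
        simpa using this
      have hcast : ((k : Int) + 1) = ((k + 1 : Nat) : Int) := by push_cast; ring
      have hga : PySem.List.pyGetD numbers (k : Int) 0 = numbers[k] := by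
        rw [PySem.List.pyGetD_eq_getElem numbers 0 (by omega) (by exact_mod_cast hk1)]
        simp
      have hgb : PySem.List.pyGetD numbers ((k : Int) + 1) 0 = numbers[k + 1] := by
        rw [hcast, PySem.List.pyGetD_eq_getElem numbers 0 (by omega) (by exact_mod_cast hlt)]
        simp
      have hpa := PySem.List.pop?_natCast numbers k hk1
      have hpb := PySem.List.pop?_natCast numbers (k + 1) hlt
      have hva := valid_skipping_eq numbers k hk1
      have hvb := valid_skipping_eq numbers (k + 1) hlt
      have ihk := ih (k + 1) (by omega)
      rw [show k + 1 + 1 = k + 2 from rfl] at ihk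
      conv_lhs => rw [e1, e2, List.zip_cons_cons]
      rw [PySem.List.pyRange_one_cons (by omega : (k : Int) < (numbers.length : Int) - 1)]
      simp only [loopA, loopB, hga, hgb]
      rw [hcast, hpa, hpb, hva, hvb, ← hcast]
      by_cases hc : numbers[k] ≤ numbers[k + 1] ∨ numbers[k] - numbers[k + 1] > 3
      · rw [if_pos (by rcases abs_cases (numbers[k] - numbers[k + 1]) with ⟨he, hs⟩ | ⟨he, hs⟩ <;>
            rw [he] <;> omega : numbers[k] ≤ numbers[k + 1] ∨ |numbers[k] - numbers[k + 1]| > 3),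
          if_pos hc]
        cases hc1 : check_validity (numbers.eraseIdx k) with
        | true => simp [hc1]
        | false =>
          cases hc2 : check_validity (numbers.eraseIdx (k + 1)) with
          | true => simp [hc1, hc2]
          | false =>
            simp only [hc1, hc2, Bool.false_eq_true, Bool.false_or, if_false]
            rw [← e2, hcast]
            exact ihk
      · rw [if_neg (by rcases abs_cases (numbers[k] - numbers[k + 1]) with ⟨he, hs⟩ | ⟨he, hs⟩ <;>
            rw [he] <;> omega : ¬ (numbers[k] ≤ numbers[k + 1] ∨ |numbers[k] - numbers[k + 1]| > 3)),
          if_neg hc]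
        rw [← e2, hcast]
        exact ihk
    · have h1 : numbers.drop (k + 1) = [] := List.drop_eq_nil_iff.mpr (by omega)
      rw [h1, List.zip_nil_right, PySem.List.pyRange_one_eq_nil (by omega)]
      rfl

-- ===== VERDICT (by name: the statement is the Claim_ definition above) =====
theorem check_reverse_spec : Claim_equal_check_reverse := by
  intro numbers _
  unfold Spec_check_reverse check_reverse check_reverse_alt
  have h := loop_eq_aux numbers numbers.length 0 (by omega)
  simpa using h
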